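-- pv_equiv track=rewrite | github.com/DPNT-Sourcecode/CHK-jahe01 | lib/solutions/CHK/checkout_solution.py | price_H
-- ===== SOURCE A (Python) =====
-- UNIT_PRICE = {
--     "A": 50, "B": 30, "C": 20, "D": 15, "E": 40,
--     "F": 10, "G": 20, "H": 10, "I": 35, "J": 60,
--     "K": 70, "L": 90, "M": 15, "N": 40, "O": 10,
--     "P": 50, "Q": 30, "R": 50, "S": 20, "T": 20,
--     "U": 40, "V": 50, "W": 20, "X": 17, "Y": 20,
--     "Z": 21,
-- }
--
-- BUNDLE_DEALS = {
--     "A": {"PRICE_FOR_5": 200, "PRICE_FOR_3": 130},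
--     "B": {"PRICE_FOR_2": 45},
--     "H": {"PRICE_FOR_10": 80, "PRICE_FOR_5": 45},
--     "K": {"PRICE_FOR_2": 120},
--     "P": {"PRICE_FOR_5": 200},
--     "Q": {"PRICE_FOR_3": 80},
--     "V": {"PRICE_FOR_3": 130, "PRICE_FOR_2": 90},
--     "F": {"PRICE_FOR_3": 2 * UNIT_PRICE["F"]},
--     "U": {"PRICE_FOR_4": 3 * UNIT_PRICE["U"]},
-- }
--
-- def price_H(amount):
--     unit_price = UNIT_PRICE['H']
--     lowest_total_price = amount * unit_price  # baseline with no bundles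
--
--     # Explore all possible combinations of 10-pack and 5-pack bundles
--     for num_ten_pack_bundles in range(amount // 10 + 1):
--         remaining_after_tens = amount - 10 * num_ten_pack_bundles
--
--         for num_five_pack_bundles in range(remaining_after_tens // 5 + 1):
--             remaining_singles = remaining_after_tens - 5 * num_five_pack_bundles
--
--             total_for_this_combo = (
--                 num_ten_pack_bundles * BUNDLE_DEALS["H"]["PRICE_FOR_10"]
--                 + num_five_pack_bundles * BUNDLE_DEALS["H"]["PRICE_FOR_5"]
--                 + remaining_singles * unit_price
--             )
--
--             lowest_total_price = min(lowest_total_price, total_for_this_combo)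
--
--     return lowest_total_price
-- ===== SOURCE B (Python) =====
-- def price_H(amount):
--     tens, rem = divmod(amount, 10)
--     fives, singles = divmod(rem, 5)
--     return tens * 80 + fives * 45 + singles * 10
-- ===== Notes on version B (the rewrite author's own statement) =====
-- stated objective: faster
-- what changed: Replaced the nested enumeration of all 10-pack/5-pack combinations with a greedy closed form (floor-divide into ten-packs, then five-packs, then singles), exact because each larger bundle is strictly cheaper per unit.
-- outside the precondition, e.g. on price_H(-3): A returns -30, B returns -15
import Mathlib
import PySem

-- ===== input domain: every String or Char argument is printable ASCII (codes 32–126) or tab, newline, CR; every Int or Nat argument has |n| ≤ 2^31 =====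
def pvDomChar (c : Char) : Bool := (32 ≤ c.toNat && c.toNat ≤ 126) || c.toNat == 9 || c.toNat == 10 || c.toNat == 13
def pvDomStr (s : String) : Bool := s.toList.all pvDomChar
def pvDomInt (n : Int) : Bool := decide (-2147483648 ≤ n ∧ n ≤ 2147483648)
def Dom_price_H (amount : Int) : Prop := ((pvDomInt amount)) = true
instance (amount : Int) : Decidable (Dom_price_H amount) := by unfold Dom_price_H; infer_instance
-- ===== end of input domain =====

-- B replaces A's quadratic enumeration of all 10-pack/5-pack combinations with an O(1)
-- greedy closed form (floor-divide into ten-packs, then five-packs), exact since bigger bundles are cheaper per unit.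

-- ===== PORT A =====
def price_H (amount : Int) : Int :=
  let unit_price : Int := 10
  let lowest_total_price : Int := amount * unit_price
  (PySem.List.pyRange 0 (PySem.Int.floordiv amount 10 + 1) 1).foldl
    (fun lowest t =>
      let remaining_after_tens := amount - 10 * t
      (PySem.List.pyRange 0 (PySem.Int.floordiv remaining_after_tens 5 + 1) 1).foldl
        (fun lowest f =>
          let remaining_singles := remaining_after_tens - 5 * f
          min lowest (t * 80 + f * 45 + remaining_singles * unit_price))
        lowest)
    lowest_total_price

-- ===== PORT B =====
-- divmod(amount, 10) ported as (floordiv, mod) — exact, the divisor is a nonzero literal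
def price_H_alt (amount : Int) : Int :=
  let tens := PySem.Int.floordiv amount 10
  let rem := PySem.Int.mod amount 10
  let fives := PySem.Int.floordiv rem 5
  let singles := PySem.Int.mod rem 5
  tens * 80 + fives * 45 + singles * 10

-- ===== PRECONDITION & SPEC =====
-- Pre_ restricts to the natural domain of a quantity: on negative amounts (no bundle fits)
-- A just returns 10*amount from its baseline, while B's floor-divmod form gives another value.
def Pre_price_H (amount : Int) : Prop := 0 ≤ amount
instance (amount : Int) : Decidable (Pre_price_H amount) := by unfold Pre_price_H; infer_instance
def pvWitness_price_H : Int := 23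

def Spec_price_H (amount : Int) (out : Int) : Prop := out = price_H_alt amount
instance (amount : Int) (out : Int) : Decidable (Spec_price_H amount out) := by unfold Spec_price_H; infer_instance

-- ===== CLAIM (what is proved, stated in full; the proofs are below) =====
def Claim_equal_price_H : Prop := ∀ (amount : Int), Dom_price_H amount → Pre_price_H amount → Spec_price_H amount (price_H amount)

-- ===== LEMMAS AND PROOFS =====

-- an antitone step hypothesis propagates along the whole range
lemma pv_chain (h : Int → Int) (a b : Int)
    (mono : ∀ i, a ≤ i → i + 1 < b → h (i + 1) ≤ h i) :
    ∀ (n : Nat) (i : Int), a ≤ i → i < b → b - 1 - i = n → h (b - 1) ≤ h i := by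
  intro n
  induction n with
  | zero =>
    intro i h1 h2 h3
    have : b - 1 = i := by omega
    rw [this]
  | succ k ih =>
    intro i h1 h2 h3
    exact le_trans (ih (i + 1) (by omega) (by omega) (by omega)) (mono i h1 (by omega))

-- folding 'min' with an antitone function over range(a,b) keeps only the last value
lemma pv_foldl_min_last (h : Int → Int) :
    ∀ (n : Nat) (a acc b : Int), b - a = (n : Int) → a < b →
    (∀ i, a ≤ i → i + 1 < b → h (i + 1) ≤ h i) →
    (PySem.List.pyRange a b 1).foldl (fun x i => min x (h i)) acc = min acc (h (b - 1)) := by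
  intro n
  induction n with
  | zero => intro a acc b hn hab _; omega
  | succ k ih =>
    intro a acc b hn hab mono
    rw [PySem.List.pyRange_one_cons hab]
    simp only [List.foldl_cons]
    by_cases hk : b ≤ a + 1
    · have hb : b = a + 1 := by omega
      rw [PySem.List.pyRange_one_eq_nil (by omega)]
      simp [hb]
    · rw [ih (a + 1) (min acc (h a)) b (by omega) (by omega)
          (fun i hi h2 => mono i (by omega) h2)]
      have hle : h (b - 1) ≤ h a := pv_chain h a b mono (b - 1 - a).toNat a le_rfl hab (by omega)
      rw [min_assoc, min_eq_right hle]

lemma pv_foldl_congr {β : Type} (l : List β) (f g : Int → β → Int)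
    (h : ∀ a x, x ∈ l → f a x = g a x) : ∀ acc, l.foldl f acc = l.foldl g acc := by
  induction l with
  | nil => intro acc; rfl
  | cons x t ih =>
    intro acc
    simp only [List.foldl_cons]
    rw [h acc x (List.mem_cons_self), ih (fun a y hy => h a y (List.mem_cons_of_mem _ hy))]

theorem price_H_spec : Claim_equal_price_H := by
  intro amount _ hpre
  unfold Spec_price_H price_H price_H_alt
  simp only []
  set q := PySem.Int.floordiv amount 10 with hq
  have h10 : (0:Int) < 10 := by norm_num
  have hqd : q = amount / 10 := PySem.Int.floordiv_eq_ediv_of_pos h10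
  have hq0 : 0 ≤ q := by rw [hqd]; exact Int.ediv_nonneg hpre (by norm_num)
  have hqm : q * 10 + PySem.Int.mod amount 10 = amount := PySem.Int.floordiv_mul_add_mod amount 10
  have hmod : PySem.Int.mod amount 10 = amount % 10 := PySem.Int.mod_eq_emod_of_pos h10
  have hr0 : 0 ≤ PySem.Int.mod amount 10 := by rw [hmod]; exact Int.emod_nonneg _ (by norm_num)
  have hr10 : PySem.Int.mod amount 10 < 10 := by rw [hmod]; exact Int.emod_lt_of_pos _ h10
  -- per-t value of the inner loop
  set g : Int → Int := fun t =>
    t * 80 + PySem.Int.floordiv (amount - 10 * t) 5 * 45 +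
      PySem.Int.mod (amount - 10 * t) 5 * 10 with hg
  -- small divmod facts for divisor 5
  have div5 : ∀ r : Int, 0 ≤ r →
      PySem.Int.floordiv r 5 * 5 + PySem.Int.mod r 5 = r ∧
      0 ≤ PySem.Int.mod r 5 ∧ PySem.Int.mod r 5 < 5 ∧ 0 ≤ PySem.Int.floordiv r 5 := by
    intro r hr
    have h5 : (0:Int) < 5 := by norm_num
    refine ⟨PySem.Int.floordiv_mul_add_mod r 5, ?_, ?_, ?_⟩
    · rw [PySem.Int.mod_eq_emod_of_pos h5]; exact Int.emod_nonneg _ (by norm_num)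
    · rw [PySem.Int.mod_eq_emod_of_pos h5]; exact Int.emod_lt_of_pos _ h5
    · rw [PySem.Int.floordiv_eq_ediv_of_pos h5]; exact Int.ediv_nonneg hr (by norm_num)
  -- the inner fold collapses to min acc (g t) for each t in the outer range
  have inner : ∀ (acc t : Int), t ∈ PySem.List.pyRange 0 (q + 1) 1 →
      (PySem.List.pyRange 0 (PySem.Int.floordiv (amount - 10 * t) 5 + 1) 1).foldl
        (fun lowest f => min lowest (t * 80 + f * 45 + (amount - 10 * t - 5 * f) * 10)) acc
      = min acc (g t) := by
    intro acc t ht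
    rw [PySem.List.mem_pyRange_one] at ht
    have hrem : 0 ≤ amount - 10 * t := by
      have : t ≤ q := by omega
      have := hr10; omega
    obtain ⟨he, hm0, hm5, hd0⟩ := div5 (amount - 10 * t) hrem
    rw [pv_foldl_min_last (fun f => t * 80 + f * 45 + (amount - 10 * t - 5 * f) * 10)
        (PySem.Int.floordiv (amount - 10 * t) 5 + 1).toNat 0 acc _ (by omega) (by omega)
        (by intro i _ _; simp only []; omega)]
    simp only [hg]
    congr 1
    omega
  -- rewrite the outer fold body via `inner`
  rw [pv_foldl_congr _ _ (fun low t => min low (g t)) (fun a t ht => inner a t ht) (amount * 10)]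
  -- collapse the outer fold
  have hmono : ∀ t, 0 ≤ t → t + 1 < q + 1 → g (t + 1) ≤ g t := by
    intro t ht0 htq
    have hrem' : 0 ≤ amount - 10 * (t + 1) := by
      have := hr10; omega
    obtain ⟨he', hm0', hm5', _⟩ := div5 (amount - 10 * (t + 1)) hrem'
    have hdiv : PySem.Int.floordiv (amount - 10 * t) 5 =
        PySem.Int.floordiv (amount - 10 * (t + 1)) 5 + 2 := by
      rw [(PySem.Int.floordiv_eq_iff_of_pos (by norm_num) ..)]
      omega
    have hmodeq : PySem.Int.mod (amount - 10 * t) 5 = PySem.Int.mod (amount - 10 * (t + 1)) 5 := by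
      have := PySem.Int.floordiv_mul_add_mod (amount - 10 * t) 5
      omega
    simp only [hg]
    omega
  rw [pv_foldl_min_last g (q + 1).toNat 0 (amount * 10) (q + 1) (by omega) (by omega) hmono]
  -- min with the baseline is the greedy value, which equals B
  obtain ⟨he, hm0, hm5, hd0⟩ := div5 (amount - 10 * q) (by have := hr10; omega)
  have hrq : amount - 10 * q = PySem.Int.mod amount 10 := by omega
  simp only [hg]
  rw [show q + 1 - 1 = q by ring, hrq]
  rw [hrq] at he hm0 hm5 hd0
  rw [min_eq_right (by omega)]

-- ===== VERDICT (by name: the statement is the Claim_ definition above) =====
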